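-- pv_equiv track=rewrite | github.com/jhkj22/alice | main_092.py | connect_line
-- ===== SOURCE A (Python) =====
-- def connect_line(line, tolerance=1):
--     l_result = [[-99999]]
--     for i in line:
--         i2 = l_result[-1][-1]
--         if i - i2 <= tolerance:
--             l_result[-1].append(i)
--         else:
--             l_result.append([i])
--     return l_result[1:]
-- ===== SOURCE B (Python) =====
-- def connect_line(line, tolerance=1):
--     seq = [-99999] + list(line)
--     n = len(seq)
--     cuts = [k for k in range(1, n) if seq[k] - seq[k - 1] > tolerance]
--     bounds = cuts + [n]
--     return [seq[a:b] for a, b in zip(bounds, bounds[1:])]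
-- ===== Notes on version B (the rewrite author's own statement) =====
-- stated objective: alternative
-- what changed: B finds the break indices in one filter pass over adjacent pairs of the sentinel-prepended sequence (A's -99999 sentinel is observable behaviour, so it stays part of the function) and emits the runs as slices between consecutive boundaries, instead of A's growing a nested result list by appending into its last group.
import Mathlib
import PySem

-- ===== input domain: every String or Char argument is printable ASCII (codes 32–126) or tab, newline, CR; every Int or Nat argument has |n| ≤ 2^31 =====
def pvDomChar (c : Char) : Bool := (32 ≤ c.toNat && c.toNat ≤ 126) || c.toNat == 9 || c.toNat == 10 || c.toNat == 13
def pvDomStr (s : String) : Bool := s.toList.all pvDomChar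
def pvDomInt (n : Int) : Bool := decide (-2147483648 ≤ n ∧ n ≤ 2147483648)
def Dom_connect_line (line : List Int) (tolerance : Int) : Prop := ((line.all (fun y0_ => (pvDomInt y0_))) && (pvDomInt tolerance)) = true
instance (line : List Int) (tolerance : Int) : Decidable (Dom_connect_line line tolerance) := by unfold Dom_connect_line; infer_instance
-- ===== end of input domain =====

-- B groups by break indices + slices (over the sentinel-prepended sequence; A's -99999
-- sentinel is observable, so it stays part of the function) instead of A's growing a
-- nested result list by appending into its last group; same return value everywhere.

-- ===== PORT A =====
-- the loop body of A; l_result and its groups are always nonempty, so the [-1] lookups use pyGetD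
def stepA (tolerance : Int) (acc : List (List Int)) (i : Int) : List (List Int) :=
  let i2 := PySem.List.pyGetD (PySem.List.pyGetD acc (-1) []) (-1) 0
  if i - i2 ≤ tolerance then acc.dropLast ++ [PySem.List.pyGetD acc (-1) [] ++ [i]] else acc ++ [[i]]

def connect_line (line : List Int) (tolerance : Int) : List (List Int) :=
  PySem.List.slice (line.foldl (stepA tolerance) [[-99999]]) (some 1) none

-- ===== PORT B =====
def connect_line_alt (line : List Int) (tolerance : Int) : List (List Int) :=
  let seq : List Int := [-99999] ++ line
  let n : Int := (seq.length : Int)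
  let cuts : List Int := (PySem.List.pyRange 1 n 1).filter
    (fun k => PySem.List.pyGetD seq k 0 - PySem.List.pyGetD seq (k - 1) 0 > tolerance)
  let bounds : List Int := cuts ++ [n]
  (bounds.zip (PySem.List.slice bounds (some 1) none)).map
    (fun ab => PySem.List.slice seq (some ab.1) (some ab.2))

-- ===== PRECONDITION & SPEC =====
def Spec_connect_line (line : List Int) (tolerance : Int) (out : List (List Int)) : Prop := out = connect_line_alt line tolerance
instance (line : List Int) (tolerance : Int) (out : List (List Int)) : Decidable (Spec_connect_line line tolerance out) := by unfold Spec_connect_line; infer_instance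

-- ===== CLAIM (what is proved, stated in full; the proofs are below) =====
def Claim_equal_connect_line : Prop := ∀ (line : List Int) (tolerance : Int), Dom_connect_line line tolerance → Spec_connect_line line tolerance (connect_line line tolerance)

-- ===== LEMMAS AND PROOFS =====

-- ghost spec: chGo tol prev xs = (continuation of the run ending at prev, the remaining groups)
def chGo (tol prev : Int) : List Int → List Int × List (List Int)
  | [] => ([], [])
  | x :: xs =>
    if x - prev ≤ tol then (x :: (chGo tol x xs).1, (chGo tol x xs).2)
    else ([], (x :: (chGo tol x xs).1) :: (chGo tol x xs).2)

-- 0-based break positions of prev :: xs (j = a break between indices j and j+1)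
def cutsR0 (tol prev : Int) : List Int → List Nat
  | [] => []
  | x :: xs =>
    if x - prev > tol then 0 :: (cutsR0 tol x xs).map (fun j => j + 1)
    else (cutsR0 tol x xs).map (fun j => j + 1)

-- slices of seq between consecutive boundaries (Nat bounds)
def slicesN (seq : List Int) : List Nat → List (List Int)
  | a :: b :: t => ((seq.drop a).take (b - a)) :: slicesN seq (b :: t)
  | _ => []

theorem foldlA (tol : Int) (xs : List Int) : ∀ (gs : List (List Int)) (cur : List Int) (last : Int),
    PySem.List.pyGetD cur (-1) 0 = last →
    List.foldl (stepA tol) (gs ++ [cur]) xs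
      = gs ++ ((cur ++ (chGo tol last xs).1) :: (chGo tol last xs).2) := by
  induction xs with
  | nil => intro gs cur last h; simp [chGo]
  | cons x xs ih =>
    intro gs cur last h
    rw [List.foldl_cons]
    have hstep : stepA tol (gs ++ [cur]) x
        = if x - last ≤ tol then gs ++ [cur ++ [x]] else (gs ++ [cur]) ++ [[x]] := by
      simp [stepA, PySem.List.pyGetD_neg_one_append_singleton, h]
    by_cases hc : x - last ≤ tol
    · rw [hstep, if_pos hc, ih gs (cur ++ [x]) x (PySem.List.pyGetD_neg_one_append_singleton ..)]
      simp [chGo, hc]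
    · rw [hstep, if_neg hc]
      rw [ih (gs ++ [cur]) [x] x
        (by simpa using PySem.List.pyGetD_neg_one_append_singleton (xs := ([]:List Int)) (x := x) (d := 0))]
      simp [chGo, hc]

theorem A_eq_spec (line : List Int) (tol : Int) :
    connect_line line tol = (chGo tol (-99999) line).2 := by
  unfold connect_line
  rw [show ([[(-99999:Int)]] : List (List Int)) = [] ++ [[-99999]] from rfl,
    foldlA tol line [] [-99999] (-99999)
      (by simpa using PySem.List.pyGetD_neg_one_append_singleton (xs := ([]:List Int)) (x := (-99999:Int)) (d := 0))]
  rw [PySem.List.slice_from_one]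
  simp

theorem cuts_eq (tol : Int) (xs : List Int) : ∀ (p : Int),
    (List.range xs.length).filter (fun k => decide (xs.getD k 0 - (p :: xs).getD k 0 > tol))
      = cutsR0 tol p xs := by
  induction xs with
  | nil => intro p; simp [cutsR0]
  | cons x rest ih =>
    intro p
    rw [List.length_cons, List.range_succ_eq_map, List.filter_cons]
    have hm : (List.filter (fun k => decide ((x :: rest).getD k 0 - (p :: x :: rest).getD k 0 > tol)) ((List.range rest.length).map Nat.succ))
        = ((List.range rest.length).filter (fun k => decide (rest.getD k 0 - (x :: rest).getD k 0 > tol))).map Nat.succ := by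
      rw [List.filter_map]
      simp only [Function.comp_def, Nat.succ_eq_add_one, List.getD_cons_succ]
    rw [hm, ih x]
    simp only [cutsR0, List.getD_cons_zero]
    by_cases hc : x - p > tol
    · simp [hc]
    · simp [hc]

theorem slicesN_shift (seq : List Int) (p : Int) : ∀ (bs : List Nat),
    slicesN (p :: seq) (bs.map (fun j => j + 1)) = slicesN seq bs := by
  intro bs
  induction bs with
  | nil => simp [slicesN]
  | cons a t ih =>
    cases t with
    | nil => simp [slicesN]
    | cons b t' =>
      simp only [List.map_cons] at ih ⊢
      rw [slicesN, slicesN]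
      rw [ih]
      congr 1
      simp [Nat.add_sub_add_right, List.drop_succ_cons]

theorem mainS (tol : Int) (xs : List Int) : ∀ (p : Int),
    slicesN (p :: xs) (0 :: ((cutsR0 tol p xs).map (fun j => j + 1) ++ [xs.length + 1]))
      = (p :: (chGo tol p xs).1) :: (chGo tol p xs).2 := by
  induction xs with
  | nil => intro p; simp [cutsR0, chGo, slicesN]
  | cons x rest ih =>
    intro p
    by_cases hc : x - p > tol
    · -- a break right after p: p forms a group alone (slice of length 1)
      have hb : (cutsR0 tol p (x :: rest)).map (fun j => j + 1) ++ [(x :: rest).length + 1]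
          = 1 :: ((((cutsR0 tol x rest).map (fun j => j + 1)) ++ [rest.length + 1]).map (fun j => j + 1)) := by
        simp [cutsR0, hc, List.map_map, Function.comp_def]
      rw [hb, slicesN]
      have h1 : (1:Nat) :: (((cutsR0 tol x rest).map (fun j => j + 1)) ++ [rest.length + 1]).map (fun j => j + 1)
          = ((0 :: (((cutsR0 tol x rest).map (fun j => j + 1)) ++ [rest.length + 1])).map (fun j => j + 1)) := by
        simp
      rw [h1, slicesN_shift, ih x]
      simp [chGo, show ¬(x - p ≤ tol) from by omega]
    · -- no break: p joins the first run of x :: rest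
      have hb : (0:Nat) :: ((cutsR0 tol p (x :: rest)).map (fun j => j + 1) ++ [(x :: rest).length + 1])
          = 0 :: ((((cutsR0 tol x rest).map (fun j => j + 1)) ++ [rest.length + 1]).map (fun j => j + 1)) := by
        simp [cutsR0, hc, List.map_map, Function.comp_def]
      rw [hb]
      have ihx := ih x
      obtain ⟨h, t, ht⟩ : ∃ h t, ((cutsR0 tol x rest).map (fun j => j + 1)) ++ [rest.length + 1] = h :: t := by
        cases hE : ((cutsR0 tol x rest).map (fun j => j + 1)) ++ [rest.length + 1] with
        | nil => exact absurd hE (by simp)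
        | cons h t => exact ⟨h, t, rfl⟩
      rw [ht] at ihx ⊢
      rw [List.map_cons]
      have hu : slicesN (p :: x :: rest) (0 :: (h + 1) :: List.map (fun j => j + 1) t)
          = ((p :: x :: rest).take (h + 1)) :: slicesN (p :: x :: rest) ((h + 1) :: List.map (fun j => j + 1) t) := by
        simp [slicesN]
      have hu2 : slicesN (x :: rest) (0 :: h :: t)
          = ((x :: rest).take h) :: slicesN (x :: rest) (h :: t) := by
        simp [slicesN]
      rw [hu2] at ihx
      rw [hu, show ((h:Nat) + 1) :: List.map (fun j => j + 1) t = ((h :: t).map (fun j => j + 1)) from by simp,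
        slicesN_shift]
      have e12 := ihx
      rw [List.cons.injEq] at e12
      obtain ⟨e1, e2⟩ := e12
      rw [List.take_succ_cons, e1, e2]
      simp [chGo, show x - p ≤ tol from by omega]

theorem zipSlices (seq : List Int) : ∀ (bs : List Nat),
    (((bs.map (fun (j : Nat) => (j : Int))).zip ((bs.map (fun (j : Nat) => (j : Int))).tail)).map
      (fun ab => PySem.List.slice seq (some ab.1) (some ab.2))) = slicesN seq bs := by
  intro bs
  induction bs with
  | nil => rfl
  | cons a t ih =>
    cases t with
    | nil => rfl
    | cons b t' =>
      simp only [List.map_cons, List.tail_cons, List.zip_cons_cons] at ih ⊢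
      have : slicesN seq (a :: b :: t') = ((seq.drop a).take (b - a)) :: slicesN seq (b :: t') := by
        simp [slicesN]
      rw [this, PySem.List.slice_natCast, ih]

theorem cutsInt_eq (line : List Int) (tol : Int) :
    ((PySem.List.pyRange 1 ((([-99999] ++ line : List Int)).length : Int) 1).filter
      (fun k => PySem.List.pyGetD ([-99999] ++ line : List Int) k 0
        - PySem.List.pyGetD ([-99999] ++ line : List Int) (k - 1) 0 > tol))
      = ((cutsR0 tol (-99999) line).map (fun j => j + 1)).map (fun (j : Nat) => (j : Int)) := by
  rw [PySem.List.pyRange_one]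
  have hlen : (((([-99999] ++ line : List Int)).length : Int) - 1).toNat = line.length := by simp
  rw [hlen, List.filter_map]
  have hcomp : ((fun k : Int => decide (PySem.List.pyGetD ([-99999] ++ line : List Int) k 0
        - PySem.List.pyGetD ([-99999] ++ line : List Int) (k - 1) 0 > tol)) ∘ (fun (k : Nat) => (1 : Int) + k))
      = fun (k : Nat) => decide (line.getD k 0 - ((-99999 : Int) :: line).getD k 0 > tol) := by
    funext k
    simp only [Function.comp_apply]
    have h2 : ((1 : Int) + (k:Int)) - 1 = ((k : Nat) : Int) := by ring
    have h1 : ((1 : Int) + (k:Int)) = ((k + 1 : Nat) : Int) := by push_cast; ring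
    rw [h2, h1, PySem.List.pyGetD_natCast, PySem.List.pyGetD_natCast]
    simp
  rw [hcomp, cuts_eq]
  rw [List.map_map]
  apply List.map_congr_left
  intro j _
  simp only [Function.comp_apply]
  push_cast
  ring

theorem B_eq_spec (line : List Int) (tol : Int) :
    connect_line_alt line tol = (chGo tol (-99999) line).2 := by
  simp only [connect_line_alt]
  rw [PySem.List.slice_from_one, cutsInt_eq]
  have hb : ((((cutsR0 tol (-99999) line).map (fun j => j + 1)).map (fun (j : Nat) => (j : Int)))
        ++ [((([-99999] ++ line : List Int)).length : Int)])
      = ((((cutsR0 tol (-99999) line).map (fun j => j + 1)) ++ [line.length + 1]).map (fun (j : Nat) => (j : Int))) := by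
    rw [List.map_append]
    simp
  rw [hb, zipSlices]
  set bsN := (((cutsR0 tol (-99999) line).map (fun j => j + 1)) ++ [line.length + 1]) with hbs
  obtain ⟨h, t, ht⟩ : ∃ h t, bsN = h :: t := by
    cases hE : bsN with
    | nil => exact absurd (hbs ▸ hE) (by simp)
    | cons h t => exact ⟨h, t, rfl⟩
  have hm := mainS tol line (-99999)
  rw [← hbs, ht] at hm
  have hu : slicesN ((-99999:Int) :: line) (0 :: h :: t)
      = (((-99999:Int) :: line).take h) :: slicesN ((-99999:Int) :: line) (h :: t) := by
    simp [slicesN]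
  rw [hu, List.cons.injEq] at hm
  rw [ht]
  exact hm.2

-- ===== VERDICT (by name: the statement is the Claim_ definition above) =====
theorem connect_line_spec : Claim_equal_connect_line := by
  intro line tolerance _
  unfold Spec_connect_line
  rw [A_eq_spec, B_eq_spec]
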